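-- pv_equiv track=rewrite | github.com/fabiosilvaeng/Code-Wars | Code Wars exercicios/nico_variation_crypto.py | nico
-- ===== SOURCE A (Python) =====
-- def nico(key,msg):
--
--     srted = ''.join(sorted(key))
--     number = []
--     txt = ''
--     dicio = {}
--
--     if len(key) >= len(msg):
--         msg += ((len(key)-len(msg))*' ')
--
--     div = 1 if len(key) >= len(msg) else int(len(msg)/len(key)) if len(msg)%len(key) == 0 else (int(len(msg)/len(key))+1)
--
--     for index in key:
--         number.append((srted.index(index))+1)
--
--     for k in range (div):
--         dicio = {}
--         fraction = msg[(len(key))*k:(len(key))*(k+1)]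
--         if len(fraction) <= len(key):
--             fraction = fraction + ((len(key)-len(fraction))*' ') if len(fraction) <= len(key) else fraction
--
--         for i in range (len(fraction)):
--             dicio[number[i]] = fraction[i]
--
--         for u in sorted(number):
--             txt += dicio[u]
--
--     return txt
-- ===== SOURCE B (Python) =====
-- def nico(key, msg):
--     # Flat one-pass re-implementation: precompute the rank->last-index permutation
--     # once, pad the message to a whole number of blocks, then emit every output
--     # character by direct index arithmetic (no per-chunk dict rebuilding).
--     srted = ''.join(sorted(key))
--     ranks = [srted.index(c) + 1 for c in key]
--     last = {}
--     for i, r in enumerate(ranks):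
--         last[r] = i
--     perm = [last[r] for r in sorted(ranks)]
--     k = len(key)
--     div = 1 if len(msg) <= k else -(-len(msg) // k)
--     padded = msg + ' ' * (div * k - len(msg))
--     return ''.join(padded[(i // k) * k + perm[i % k]] for i in range(len(padded)))
-- ===== Notes on version B (the rewrite author's own statement) =====
-- stated objective: alternative
-- what changed: B precomputes the rank->last-index permutation once and pads the message to div*len(key), then emits the whole ciphertext in one flat indexed pass, instead of A's per-chunk loop that rebuilds a rank->char dict and re-sorts the rank list for every chunk.
-- outside the precondition, e.g. on nico('', 'abc'): A raises ZeroDivisionError, B raises ZeroDivisionError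
import Mathlib
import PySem

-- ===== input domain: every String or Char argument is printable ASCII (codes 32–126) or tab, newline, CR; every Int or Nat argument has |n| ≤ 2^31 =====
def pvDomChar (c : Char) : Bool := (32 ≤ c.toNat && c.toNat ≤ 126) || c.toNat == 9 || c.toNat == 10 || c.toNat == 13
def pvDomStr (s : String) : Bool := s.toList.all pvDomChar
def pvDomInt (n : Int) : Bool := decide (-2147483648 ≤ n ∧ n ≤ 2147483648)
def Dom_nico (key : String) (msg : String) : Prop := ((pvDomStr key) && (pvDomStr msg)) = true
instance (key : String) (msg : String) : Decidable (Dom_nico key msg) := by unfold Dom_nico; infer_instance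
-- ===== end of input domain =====

-- B replaces A's per-chunk dict rebuilding and repeated sorted() calls by one precomputed
-- rank->last-index permutation and a single flat indexed pass (objective: alternative decomposition).

-- ===== PORT A =====
-- Literal port of A. Exactness notes: ''.join(sorted(key)) followed by str.index(c) for a
-- single char equals first-index in the sorted char list; int(a/b) for the nonnegative sizes
-- here equals Nat division; number[i]/fraction[i]/dicio[u] never miss on admitted inputs, so
-- the total pyGetD/getD forms with an arbitrary default are exact.
def nico (key : String) (msg : String) : String :=
  let keyL := key.toList
  let srted := PySem.List.sorted keyL (fun c => c) false
  let msgL := msg.toList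
  let msgL := if keyL.length ≥ msgL.length then msgL ++ List.replicate (keyL.length - msgL.length) ' ' else msgL
  let div : Nat :=
    if keyL.length ≥ msgL.length then 1
    else if msgL.length % keyL.length = 0 then msgL.length / keyL.length
    else msgL.length / keyL.length + 1
  let number : List Nat := keyL.foldl (fun acc c => acc ++ [(PySem.List.index? srted c).getD 0 + 1]) []
  let txt : List Char := (PySem.List.pyRange 0 (div : Int) 1).foldl (fun txt k =>
    let fraction := PySem.List.slice msgL (some ((keyL.length : Int) * k)) (some ((keyL.length : Int) * (k + 1)))
    let fraction := if fraction.length ≤ keyL.length then fraction ++ List.replicate (keyL.length - fraction.length) ' ' else fraction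
    let dicio : PySem.Dict Nat Char := (PySem.List.pyRange 0 (fraction.length : Int) 1).foldl
      (fun d i => d.insert (PySem.List.pyGetD number i 0) (PySem.List.pyGetD fraction i ' ')) PySem.Dict.empty
    (PySem.List.sorted number (fun u => u) false).foldl (fun t u => t ++ [dicio.getD u ' ']) txt) []
  String.ofList txt

-- ===== PORT B =====
-- Literal port of Source B (rank->last-index permutation computed once, message padded to
-- div*len(key), then one flat indexed pass). ''.join(sorted(key)).index(c) for a single
-- char is first-index in the sorted char list; -(-m // k) is Python's ceiling division,
-- nonnegative here, so .toNat is exact; len(padded) = div*len(key) + what padding adds.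
def nico_alt (key : String) (msg : String) : String :=
  let keyL := key.toList
  let msgL := msg.toList
  let srted := PySem.List.sorted keyL (fun c => c) false
  let ranks : List Nat := keyL.map (fun c => (PySem.List.index? srted c).getD 0 + 1)
  let last : PySem.Dict Nat Int := (PySem.List.enumerate ranks).foldl (fun d p => d.insert p.2 p.1) PySem.Dict.empty
  let perm : List Int := (PySem.List.sorted ranks (fun u => u) false).map (fun r => last.getD r 0)
  let n := keyL.length
  let div : Nat := if msgL.length ≤ n then 1 else (-(PySem.Int.floordiv (-(msgL.length : Int)) (n : Int))).toNat
  let padded := msgL ++ List.replicate (div * n - msgL.length) ' '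
  String.ofList ((PySem.List.pyRange 0 (padded.length : Int) 1).map
    (fun i => PySem.List.pyGetD padded (PySem.Int.floordiv i (n : Int) * (n : Int) + PySem.List.pyGetD perm (PySem.Int.mod i (n : Int)) 0) ' '))

-- ===== PRECONDITION & SPEC =====
-- Pre_ excludes only key = "" with msg ≠ "", where A raises ZeroDivisionError (len(msg) % len(key)).
def Pre_nico (key : String) (msg : String) : Prop := key ≠ "" ∨ msg = ""
instance (key : String) (msg : String) : Decidable (Pre_nico key msg) := by unfold Pre_nico; infer_instance
def pvWitness_nico : String × String := ("ba", "code")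

def Spec_nico (key : String) (msg : String) (out : String) : Prop := out = nico_alt key msg
instance (key : String) (msg : String) (out : String) : Decidable (Spec_nico key msg out) := by unfold Spec_nico; infer_instance

-- ===== CLAIM (what is proved, stated in full; the proofs are below) =====
def Claim_equal_nico : Prop := ∀ (key : String) (msg : String), Dom_nico key msg → Pre_nico key msg → Spec_nico key msg (nico key msg)

-- ===== LEMMAS AND PROOFS =====

-- every input list is recovered by indexing it along range of its length
theorem pv_map_getD_range {α : Type} (xs : List α) (d : α) :
    (List.range xs.length).map (fun i => xs.getD i d) = xs := by
  apply List.ext_getElem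
  · simp
  · intro i h1 h2
    simp [List.getD_eq_getElem?_getD, List.getElem?_eq_getElem h2]

-- a flat pass over range (d*n) is the chunked double pass
theorem pv_map_range_mul {α : Type} (f : Nat → α) (d n : Nat) :
    (List.range (d * n)).map f
      = (List.range d).flatMap (fun k => (List.range n).map (fun j => f (k * n + j))) := by
  induction d with
  | zero => simp
  | succ d ih =>
    have : (d + 1) * n = d * n + n := by ring
    rw [this, List.range_add, List.map_append, ih, List.range_succ, List.flatMap_append]
    simp [List.map_map, Function.comp_def]

-- enumerate is indexing along range
theorem pv_enumerate_eq {α : Type} [Inhabited α] (xs : List α) :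
    ∀ (s : Int), PySem.List.enumerate xs s
      = (List.range xs.length).map (fun (i : Nat) => (s + (i : Int), xs.getD i default)) := by
  induction xs with
  | nil => intro s; rfl
  | cons x t ih =>
    intro s
    show (s, x) :: PySem.List.enumerate t (s + 1) = _
    rw [ih (s + 1), List.length_cons, List.range_succ_eq_map, List.map_cons, List.map_map]
    congr 1
    · simp
    · apply List.map_congr_left
      intro i _
      simp only [Function.comp_apply, List.getD_cons_succ, Prod.mk.injEq]
      constructor
      · push_cast; ring
      · trivial

-- the char dict A builds per chunk tracks the index dict B builds once
theorem pv_dict_par (frac : List Char) (ranks : List Nat) :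
    ∀ (is : List Nat) (dC : PySem.Dict Nat Char) (dI : PySem.Dict Nat Int),
      (∀ u, dC.get? u = (dI.get? u).map (fun i => frac.getD i.toNat ' ')) →
      ∀ u, ((is.foldl (fun d i => d.insert (ranks.getD i 0) (frac.getD i ' ')) dC).get? u)
        = ((is.foldl (fun d i => d.insert (ranks.getD i 0) ((i : Int))) dI).get? u).map
            (fun i => frac.getD i.toNat ' ') := by
  intro is
  induction is with
  | nil => intro dC dI h u; exact h u
  | cons i t ih =>
    intro dC dI h u
    simp only [List.foldl_cons]
    apply ih
    intro v
    rw [PySem.Dict.get?_insert, PySem.Dict.get?_insert]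
    split_ifs with hv
    · simp
    · exact h v

-- values stored by the index-insert fold come from the index list (or the start dict)
theorem pv_dict_vals (ranks : List Nat) :
    ∀ (is : List Nat) (dI : PySem.Dict Nat Int) (u : Nat) (v : Int),
      ((is.foldl (fun d i => d.insert (ranks.getD i 0) ((i : Int))) dI).get? u = some v) →
      (∃ j ∈ is, v = (j : Int)) ∨ dI.get? u = some v := by
  intro is
  induction is with
  | nil => intro dI u v h; exact Or.inr h
  | cons i t ih =>
    intro dI u v h
    simp only [List.foldl_cons] at h
    rcases ih _ u v h with h1 | h1
    · obtain ⟨j, hj, hv⟩ := h1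
      exact Or.inl ⟨j, List.mem_cons_of_mem _ hj, hv⟩
    · rw [PySem.Dict.get?_insert] at h1
      split_ifs at h1 with hu
      · exact Or.inl ⟨i, List.mem_cons_self, (Option.some_inj.mp h1).symm⟩
      · exact Or.inr h1

-- every rank that occurs in ranks gets an entry in the index dict
theorem pv_dict_cover (ranks : List Nat) (u : Nat) (hu : u ∈ ranks) :
    ((List.range ranks.length).foldl (fun d i => d.insert (ranks.getD i 0) ((i : Int)))
      PySem.Dict.empty).get? u ≠ none := by
  intro hnone
  rw [PySem.Dict.get?_eq_none_iff_contains] at hnone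
  have hmem : u ∈ ((List.range ranks.length).foldl
      (fun d i => d.insert (ranks.getD i 0) ((i : Int))) PySem.Dict.empty).keys := by
    rw [PySem.Dict.keys_foldl_insert_key]
    have : (List.range ranks.length).map (fun i => ranks.getD i 0) = ranks :=
      pv_map_getD_range ranks 0
    rw [this]
    rw [PySem.Set.mem_update]
    exact Or.inr hu
  rw [← PySem.Dict.contains_iff_mem_keys] at hmem
  rw [hnone] at hmem
  exact absurd hmem (by simp)

-- the padded chunk of the padded message, read pointwise, is the fully padded message
theorem pv_chunk_getD (msg1 : List Char) (n d k j : Nat) (hj : j < n)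
    (hkd : k < d) (hlow : k * n ≤ msg1.length) (hhi : msg1.length ≤ d * n) :
    ((msg1.drop (k * n)).take n
      ++ List.replicate (n - ((msg1.drop (k * n)).take n).length) ' ').getD j ' '
    = (msg1 ++ List.replicate (d * n - msg1.length) ' ').getD (k * n + j) ' ' := by
  have hfl : ((msg1.drop (k * n)).take n).length = min n (msg1.length - k * n) := by
    simp
  have hkn : k * n + n ≤ d * n := by
    have h1 := Nat.mul_le_mul_right n (Nat.succ_le_of_lt hkd)
    rw [Nat.succ_mul] at h1
    exact h1
  by_cases hc : k * n + j < msg1.length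
  · have hjf : j < ((msg1.drop (k * n)).take n).length := by omega
    rw [List.getD_append _ _ _ _ hjf, List.getD_eq_getElem _ _ hjf,
      List.getElem_take, List.getElem_drop,
      List.getD_append _ _ _ _ hc, List.getD_eq_getElem _ _ hc]
  · have hjf : ((msg1.drop (k * n)).take n).length ≤ j := by omega
    rw [List.getD_append_right _ _ _ _ hjf,
      List.getD_append_right _ _ _ _ (by omega),
      List.getD_replicate _ (by omega), List.getD_replicate _ (by omega)]

-- A's and B's div agree (n > 0)
theorem pv_div_eq (m n : Nat) (hn : 0 < n) :
    (if n ≥ m then 1 else if m % n = 0 then m / n else m / n + 1)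
      = (if m ≤ n then 1 else (-(PySem.Int.floordiv (-(m : Int)) (n : Int))).toNat) := by
  by_cases h : m ≤ n
  · simp [h, ge_iff_le]
  · have hmn : n < m := by omega
    have hdm : n * (m / n) + m % n = m := Nat.div_add_mod m n
    have hb : m % n < n := Nat.mod_lt _ hn
    have hdm' : (n : Int) * ((m / n : Nat) : Int) + ((m % n : Nat) : Int) = (m : Int) := by
      exact_mod_cast hdm
    have hb' : ((m % n : Nat) : Int) < (n : Int) := by exact_mod_cast hb
    have hn' : (0 : Int) < (n : Int) := by exact_mod_cast hn
    by_cases hz : m % n = 0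
    · have hq : -(PySem.Int.floordiv (-(m : Int)) (n : Int)) = ((m / n : Nat) : Int) := by
        rw [PySem.Int.neg_floordiv_neg_eq_iff_of_pos hn']
        have hz' : ((m % n : Nat) : Int) = 0 := by exact_mod_cast hz
        constructor <;> nlinarith [hdm', hb', hn', hz']
      simp only [ge_iff_le, if_neg h, if_pos hz, hq, Int.toNat_natCast]
    · have hz' : (0 : Int) < ((m % n : Nat) : Int) := by
        have : 0 < m % n := Nat.pos_of_ne_zero hz
        exact_mod_cast this
      have hq : -(PySem.Int.floordiv (-(m : Int)) (n : Int)) = ((m / n + 1 : Nat) : Int) := by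
        rw [PySem.Int.neg_floordiv_neg_eq_iff_of_pos hn']
        constructor <;> · rw [Nat.cast_add, Nat.cast_one]; nlinarith [hdm', hb', hn', hz']
      simp only [ge_iff_le, if_neg h, if_neg hz, hq, Int.toNat_natCast]
-- ===== VERDICT (by name: the statement is the Claim_ definition above) =====
set_option maxHeartbeats 1000000 in
theorem nico_spec : Claim_equal_nico := by
  unfold Claim_equal_nico
  intro key msg _ hPre
  unfold Spec_nico
  by_cases hkey : key = ""
  · have hmsg : msg = "" := by
      rcases hPre with h | h
      · exact absurd hkey h
      · exact h
    subst hkey hmsg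
    rfl
  · have hkL : key.toList ≠ [] := by
      intro h
      apply hkey
      have h2 := congrArg String.ofList h
      simpa using h2
    have hn : 0 < key.toList.length := List.length_pos_iff.mpr hkL
    unfold nico nico_alt
    generalize key.toList = keyL at hn ⊢
    generalize msg.toList = msgL
    simp only [ge_iff_le, PySem.List.foldl_append_singleton_eq_map, List.nil_append,
      PySem.List.foldl_append_eq_flatMap]
    set n := keyL.length with hn_eq
    set m := msgL.length with hm_eq
    set ranks := List.map (fun x => (PySem.List.index? (PySem.List.sorted keyL (fun c => c) false) x).getD 0 + 1) keyL with hranks_eq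
    set S := PySem.List.sorted ranks (fun u => u) false with hS_eq
    set msg1 := (if m ≤ n then msgL ++ List.replicate (n - m) ' ' else msgL : List Char) with hmsg1_eq
    set dv := (if m ≤ n then 1 else (-PySem.Int.floordiv (-(m:Int)) (n:Int)).toNat : Nat) with hdv_eq
    set padded := msgL ++ List.replicate (dv * n - m) ' ' with hpad_eq
    set lastd := List.foldl (fun d p => d.insert p.2 p.1) PySem.Dict.empty (PySem.List.enumerate ranks) with hlast_eq
    have hm1 : msg1.length = max n m := by
      rw [hmsg1_eq]; split_ifs with h
      · simp; omega
      · omega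
    have hdA : (if msg1.length ≤ n then 1 else if msg1.length % n = 0 then msg1.length / n else msg1.length / n + 1) = dv := by
      by_cases hmn : m ≤ n
      · have hl : msg1.length = n := by omega
        rw [hl]; simp [hdv_eq, hmn]
      · have hl : msg1.length = m := by omega
        rw [hl, hdv_eq]
        have h2 := pv_div_eq m n hn
        simpa [ge_iff_le] using h2
    have hquad : 1 ≤ dv ∧ msg1.length ≤ dv * n ∧ (dv - 1) * n ≤ msg1.length ∧ m ≤ dv * n := by
      by_cases hmn : m ≤ n
      · have hdv' : dv = 1 := by simp [hdv_eq, hmn]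
        rw [hdv']
        refine ⟨le_refl 1, ?_, ?_, ?_⟩ <;> omega
      · have hm0 : 0 < m := by omega
        have hn' : (0 : Int) < (n : Int) := by exact_mod_cast hn
        have hCb := (PySem.Int.neg_floordiv_neg_eq_iff_of_pos (a := (m : Int)) (b := (n : Int))
          (q := -PySem.Int.floordiv (-(m : Int)) (n : Int)) hn').mp rfl
        have hm0' : (0 : Int) < (m : Int) := by exact_mod_cast hm0
        have hC0 : 0 < -PySem.Int.floordiv (-(m : Int)) (n : Int) := by nlinarith [hCb.1, hCb.2]
        have hdvC : dv = (-PySem.Int.floordiv (-(m : Int)) (n : Int)).toNat := by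
          simp [hdv_eq, hmn]
        have hCtn : (((-PySem.Int.floordiv (-(m : Int)) (n : Int)).toNat : Int))
            = -PySem.Int.floordiv (-(m : Int)) (n : Int) := Int.toNat_of_nonneg hC0.le
        have h1 : m ≤ dv * n := by
          rw [hdvC]; zify; rw [hCtn]; exact hCb.2
        have hdv1 : 1 ≤ dv := by rw [hdvC]; omega
        have h3 : (dv - 1) * n < m := by
          rw [hdvC]
          have ht : 1 ≤ (-PySem.Int.floordiv (-(m : Int)) (n : Int)).toNat := by omega
          zify [ht]; rw [hCtn]; exact hCb.1
        have hl : msg1.length = m := by omega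
        rw [hl]
        exact ⟨hdv1, h1, le_of_lt h3, h1⟩
    obtain ⟨hd1, hm1le, hdlow, hmle⟩ := hquad
    have hplen : padded.length = dv * n := by
      rw [hpad_eq]; simp; omega
    have hP : msg1 ++ List.replicate (dv * n - msg1.length) ' ' = padded := by
      by_cases hmn : m ≤ n
      · have hdv' : dv = 1 := by simp [hdv_eq, hmn]
        have hlen2 : (msgL ++ List.replicate (n - m) ' ').length = n := by simp; omega
        rw [hpad_eq, hmsg1_eq, if_pos hmn, List.append_assoc, ← List.replicate_add, hlen2, hdv',
          one_mul]
        congr 2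
        omega
      · rw [hpad_eq, hmsg1_eq, if_neg hmn, ← hm_eq]
    have hrl : ranks.length = n := by rw [hranks_eq, List.length_map, ← hn_eq]
    have hSl : S.length = n := by
      rw [hS_eq, (PySem.List.sorted_perm ranks (fun u => u) false).length_eq, hrl]
    have hlast' : lastd = (List.range n).foldl
        (fun d i => d.insert (ranks.getD i 0) ((i : Int))) PySem.Dict.empty := by
      rw [hlast_eq, pv_enumerate_eq ranks 0, List.foldl_map, hrl]
      simp
    rw [hdA, hplen, PySem.List.pyRange_zero_nat dv, PySem.List.pyRange_zero_nat (dv * n),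
      List.flatMap_map, List.map_map, pv_map_range_mul]
    refine congrArg String.ofList ?_
    rw [List.flatMap_def, List.flatMap_def]
    refine congrArg List.flatten (List.map_congr_left ?_)
    intro k hk
    rw [List.mem_range] at hk
    have hkn2 : k * n ≤ msg1.length :=
      le_trans (Nat.mul_le_mul_right n (by omega : k ≤ dv - 1)) hdlow
    trans (List.map (fun u => PySem.List.pyGetD padded (((k * n : Nat) : Int) + lastd.getD u 0) ' ') S)
    · -- A-side chunk
      apply List.map_congr_left
      intro u hu
      have e3 : ((n : Int) * (k : Int)) = ((k * n : Nat) : Int) := by push_cast; ring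
      have e4 : ((n : Int) * ((k : Int) + 1)) = ((k * n + n : Nat) : Int) := by push_cast; ring
      rw [e3, e4, PySem.List.slice_natCast]
      have e5 : k * n + n - k * n = n := by omega
      rw [e5]
      set frac : List Char := (msg1.drop (k * n)).take n with hfrac_eq
      have hfle : frac.length ≤ n := by rw [hfrac_eq]; simp
      rw [if_pos hfle]
      set frac' : List Char := frac ++ List.replicate (n - frac.length) ' ' with hfrac'_eq
      have hfl' : frac'.length = n := by rw [hfrac'_eq]; simp; omega
      rw [hfl', PySem.List.pyRange_zero_nat n, List.foldl_map]
      simp only [PySem.List.pyGetD_natCast]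
      have hu' : u ∈ ranks :=
        (PySem.List.sorted_perm ranks (fun u => u) false).subset (hS_eq ▸ hu)
      have hcov := pv_dict_cover ranks u hu'
      rw [hrl, ← hlast'] at hcov
      obtain ⟨v, hv⟩ : ∃ v, lastd.get? u = some v := by
        rcases hq : lastd.get? u with _ | v
        · exact absurd hq hcov
        · exact ⟨v, rfl⟩
      obtain ⟨jv, hjv, rfl⟩ : ∃ jv, jv < n ∧ v = (jv : Int) := by
        have h2 := pv_dict_vals ranks (List.range n) PySem.Dict.empty u v
          (by rw [hlast'] at hv; exact hv)
        rcases h2 with ⟨j, hj, hvj⟩ | habs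
        · exact ⟨j, List.mem_range.mp hj, hvj⟩
        · simp at habs
      rw [PySem.Dict.getD_eq_get?_getD]
      rw [hlast', pv_dict_par frac' ranks (List.range n) PySem.Dict.empty PySem.Dict.empty
        (by intro w; simp) u, ← hlast', hv]
      simp only [Option.map_some, Option.getD_some, Int.toNat_natCast]
      rw [PySem.Dict.getD_eq_get?_getD, hv]
      simp only [Option.getD_some]
      rw [hfrac'_eq, hfrac_eq, pv_chunk_getD msg1 n dv k jv hjv hk hkn2 hm1le, hP,
        ← Nat.cast_add, PySem.List.pyGetD_natCast]
    · -- B-side chunk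
      conv_lhs => rw [← pv_map_getD_range S 0]
      rw [List.map_map, hSl]
      apply List.map_congr_left
      intro j hj
      rw [List.mem_range] at hj
      simp only [Function.comp_apply, PySem.Int.floordiv_natCast, PySem.Int.mod_natCast,
        PySem.List.pyGetD_natCast]
      have e1 : (k * n + j) / n = k := by
        rw [Nat.add_comm, Nat.add_mul_div_right _ _ hn, Nat.div_eq_of_lt hj, Nat.zero_add]
      have e2 : (k * n + j) % n = j := by
        rw [Nat.add_comm, Nat.add_mul_mod_self_right, Nat.mod_eq_of_lt hj]
      rw [e1, e2]
      have hjp : j < (List.map (fun r => lastd.getD r 0) S).length := by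
        rw [List.length_map, hSl]; exact hj
      rw [List.getD_eq_getElem _ _ hjp, List.getElem_map,
        List.getD_eq_getElem S _ (by rw [hSl]; exact hj)]
      congr 1
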